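-- pv_equiv track=rewrite | github.com/mckwk/TRNG | base.py | zigzag_scan
-- ===== SOURCE A (Python) =====
-- def zigzag_scan(blocks):
--     sequence = []
--     num_blocks = len(blocks)
--     for i in range(num_blocks):
--         if i % 2 == 0:
--             sequence.append(blocks[i])
--         else:
--             sequence.append(int(not blocks[i]))
--     return sequence
-- ===== SOURCE B (Python) =====
-- def zigzag_scan(blocks):
--     # Strided pairwise pass: emit (keep, flip) two at a time, then a tail
--     # fixup for an odd-length input; no per-index parity test.
--     out = []
--     i = 0
--     n = len(blocks)
--     while i + 1 < n:
--         out.append(blocks[i])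
--         out.append(int(not blocks[i + 1]))
--         i += 2
--     if i < n:
--         out.append(blocks[i])
--     return out
-- ===== Notes on version B (the rewrite author's own statement) =====
-- stated objective: alternative
-- what changed: Replaced the per-index loop with an i%2 parity branch by a strided while-loop that emits a (keep, flip) pair per iteration stepping by 2, plus a tail fixup for odd length.
import Mathlib
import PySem

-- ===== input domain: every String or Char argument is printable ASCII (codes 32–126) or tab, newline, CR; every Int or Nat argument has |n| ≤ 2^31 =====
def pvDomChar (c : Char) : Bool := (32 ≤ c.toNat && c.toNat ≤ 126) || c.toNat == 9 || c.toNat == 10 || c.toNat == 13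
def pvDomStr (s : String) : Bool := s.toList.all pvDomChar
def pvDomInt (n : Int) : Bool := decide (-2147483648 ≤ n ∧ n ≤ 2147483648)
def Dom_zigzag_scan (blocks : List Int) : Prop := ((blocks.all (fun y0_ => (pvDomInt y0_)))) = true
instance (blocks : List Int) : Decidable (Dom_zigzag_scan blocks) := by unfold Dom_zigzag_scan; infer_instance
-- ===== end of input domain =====

-- B replaces A's per-index loop with a parity branch by a strided two-per-step
-- loop (keep, flip, i += 2) with an odd-length tail fixup; same O(n) cost.

-- ===== PORT A =====
def zigzag_scan (blocks : List Int) : List Int :=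
  (PySem.List.pyRange 0 (PySem.List.len blocks) 1).foldl
    (fun sequence i =>
      if PySem.Int.mod i 2 == 0 then
        sequence ++ [PySem.List.pyGetD blocks i 0]
      else
        sequence ++ [if PySem.List.pyGetD blocks i 0 == 0 then (1 : Int) else 0])
    []

-- ===== PORT B =====
-- while i + 1 < n: out.append(blocks[i]); out.append(int(not blocks[i+1])); i += 2
def zigzag_scan_alt_loop (blocks : List Int) (n : Int) (i : Int) (out : List Int) : List Int :=
  if _h : i + 1 < n then
    zigzag_scan_alt_loop blocks n (i + 2)
      (out ++ [PySem.List.pyGetD blocks i 0,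
               if PySem.List.pyGetD blocks (i + 1) 0 == 0 then (1 : Int) else 0])
  else if i < n then out ++ [PySem.List.pyGetD blocks i 0] else out
termination_by (n - i).toNat
decreasing_by omega

def zigzag_scan_alt (blocks : List Int) : List Int :=
  zigzag_scan_alt_loop blocks (PySem.List.len blocks) 0 []

-- ===== PRECONDITION & SPEC =====
def Spec_zigzag_scan (blocks : List Int) (out : List Int) : Prop := out = zigzag_scan_alt blocks
instance (blocks : List Int) (out : List Int) : Decidable (Spec_zigzag_scan blocks out) := by unfold Spec_zigzag_scan; infer_instance

-- ===== CLAIM (what is proved, stated in full; the proofs are below) =====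
def Claim_equal_zigzag_scan : Prop := ∀ (blocks : List Int), Dom_zigzag_scan blocks → Spec_zigzag_scan blocks (zigzag_scan blocks)

-- ===== LEMMAS AND PROOFS =====

-- pairwise reference function both ports are reduced to
def pvPair : List Int → List Int
  | [] => []
  | [a] => [a]
  | a :: b :: rest => a :: (if b == 0 then (1 : Int) else 0) :: pvPair rest

lemma range_shift2 (n : Nat) (g : Nat → Int) :
    (List.range (n + 2)).map g = g 0 :: g 1 :: (List.range n).map (fun k => g (k + 2)) := by
  rw [List.range_succ_eq_map, List.range_succ_eq_map]
  simp [List.map_map, Function.comp]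

lemma mapform (blocks : List Int) :
    (List.range blocks.length).map
      (fun (k : Nat) => if PySem.Int.mod (k : Int) 2 == 0 then blocks.getD k 0
                else if blocks.getD k 0 == 0 then (1 : Int) else 0) = pvPair blocks := by
  induction blocks using pvPair.induct with
  | case1 => simp [pvPair]
  | case2 a => simp [pvPair, PySem.Int.mod]
  | case3 a b rest ih =>
      show (List.range (rest.length + 2)).map _ = _
      rw [range_shift2]
      have heq : ∀ k ∈ List.range rest.length,
          (if PySem.Int.mod ((k + 2 : Nat) : Int) 2 == 0 then (a :: b :: rest).getD (k+2) 0
           else if (a :: b :: rest).getD (k+2) 0 == 0 then (1 : Int) else 0)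
          = (if PySem.Int.mod ((k : Nat) : Int) 2 == 0 then rest.getD k 0
             else if rest.getD k 0 == 0 then (1 : Int) else 0) := by
        intro k _
        have hm : PySem.Int.mod ((k + 2 : Nat) : Int) 2 = PySem.Int.mod (k : Int) 2 := by
          simp [PySem.Int.mod]
        simp only [hm]
        rfl
      rw [List.map_congr_left heq, ih]
      have h0 : (PySem.Int.mod ((0:Nat) : Int) 2 == 0) = true := by decide
      have h1 : (PySem.Int.mod ((1:Nat) : Int) 2 == 0) = false := by decide
      simp only [pvPair, h0, h1, if_true, Bool.false_eq_true, if_false, List.getD_cons_zero,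
        List.getD_cons_succ]

lemma a_eq_pvPair (blocks : List Int) : zigzag_scan blocks = pvPair blocks := by
  unfold zigzag_scan
  have h1 : ∀ (acc : List Int) (i : Int),
      (if PySem.Int.mod i 2 == 0 then acc ++ [PySem.List.pyGetD blocks i 0]
       else acc ++ [if PySem.List.pyGetD blocks i 0 == 0 then (1 : Int) else 0])
      = acc ++ [if PySem.Int.mod i 2 == 0 then PySem.List.pyGetD blocks i 0
                else if PySem.List.pyGetD blocks i 0 == 0 then (1 : Int) else 0] := by
    intro acc i; split <;> rfl
  simp only [h1, PySem.List.foldl_append_singleton_eq_map, List.nil_append]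
  rw [PySem.List.pyRange_one]
  simp only [PySem.List.len_eq, List.map_map]
  rw [show ((blocks.length : Int) - 0).toNat = blocks.length by omega]
  rw [← mapform blocks]
  apply List.map_congr_left
  intro k _
  simp

lemma getD_of_drop (blocks : List Int) (k : Nat) (a : Int) (t : List Int)
    (h : blocks.drop k = a :: t) : PySem.List.pyGetD blocks (k : Int) 0 = a := by
  rw [PySem.List.pyGetD_natCast]
  have h0 : blocks[k]? = some a := by
    have h1 : (List.drop k blocks)[0]? = blocks[k + 0]? := List.getElem?_drop
    rw [h] at h1
    simpa using h1.symm
  simp [List.getD, h0]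

lemma alt_loop_eq_pvPair (blocks rest out : List Int) (i : Int)
    (hi : 0 ≤ i) (hrest : rest = blocks.drop i.toNat)
    (hn : (blocks.length : Int) = i + rest.length) :
    zigzag_scan_alt_loop blocks (PySem.List.len blocks) i out = out ++ pvPair rest := by
  induction rest using pvPair.induct generalizing i out with
  | case1 =>
      unfold zigzag_scan_alt_loop
      simp at hn
      rw [dif_neg (by simp [PySem.List.len_eq]; omega), if_neg (by simp [PySem.List.len_eq]; omega)]
      simp [pvPair]
  | case2 a =>
      unfold zigzag_scan_alt_loop
      simp at hn
      rw [dif_neg (by simp [PySem.List.len_eq]; omega), if_pos (by simp [PySem.List.len_eq]; omega)]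
      have hg : PySem.List.pyGetD blocks i 0 = a := by
        rw [show i = ((i.toNat : Nat) : Int) by omega]
        exact getD_of_drop blocks i.toNat a [] hrest.symm
      simp [pvPair, hg]
  | case3 a b rest' ih =>
      unfold zigzag_scan_alt_loop
      simp at hn
      rw [dif_pos (by simp [PySem.List.len_eq]; omega)]
      have hga : PySem.List.pyGetD blocks i 0 = a := by
        rw [show i = ((i.toNat : Nat) : Int) by omega]
        exact getD_of_drop blocks i.toNat a (b :: rest') hrest.symm
      have hdrop1 : blocks.drop (i.toNat + 1) = b :: rest' := by
        rw [← List.drop_drop, ← hrest]; rfl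
      have hgb : PySem.List.pyGetD blocks (i + 1) 0 = b := by
        rw [show i + 1 = (((i.toNat + 1 : Nat)) : Int) by omega]
        exact getD_of_drop blocks (i.toNat + 1) b rest' hdrop1
      have hdrop2 : blocks.drop ((i + 2).toNat) = rest' := by
        rw [show (i + 2).toNat = i.toNat + 2 by omega, ← List.drop_drop, ← hrest]; rfl
      rw [ih _ (i + 2) (by omega) hdrop2.symm (by omega)]
      simp [pvPair, hga, hgb]

-- ===== VERDICT (by name: the statement is the Claim_ definition above) =====
theorem zigzag_scan_spec : Claim_equal_zigzag_scan := by
  intro blocks _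
  unfold Spec_zigzag_scan zigzag_scan_alt
  rw [a_eq_pvPair, alt_loop_eq_pvPair blocks blocks [] 0 le_rfl (by simp) (by simp)]
  simp
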